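-- pv_equiv track=rewrite | github.com/jessicahojh/2020_algorithm_practice | algorithm_practice.py | origSentence
-- ===== SOURCE A (Python) =====
-- def origSentence(words, s):
--
--     answer = []
--     dictionary = {}
--
--     for word in words:
--         if word[0] not in dictionary:
--             dictionary[word[0]] = [word]
--         else:
--             dictionary[word[0]].append(word)
--
--     for i, letter in enumerate(s):
--         if letter in dictionary:
--             for word in dictionary[letter]:
--                 if s[i:i+len(word)] == word:
--                     answer.append(word)
--
--     return answer
-- ===== SOURCE B (Python) =====
-- def origSentence(words, s):
--     # Simpler: no first-letter dictionary; one flat comprehension over positions.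
--     return [w for i in range(len(s)) for w in words if s.startswith(w, i)]
-- ===== Notes on version B (the rewrite author's own statement) =====
-- stated objective: simpler
-- what changed: B drops A's first-letter grouping dictionary entirely and returns one flat comprehension over positions filtering the word list by direct slice comparison.
import Mathlib
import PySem

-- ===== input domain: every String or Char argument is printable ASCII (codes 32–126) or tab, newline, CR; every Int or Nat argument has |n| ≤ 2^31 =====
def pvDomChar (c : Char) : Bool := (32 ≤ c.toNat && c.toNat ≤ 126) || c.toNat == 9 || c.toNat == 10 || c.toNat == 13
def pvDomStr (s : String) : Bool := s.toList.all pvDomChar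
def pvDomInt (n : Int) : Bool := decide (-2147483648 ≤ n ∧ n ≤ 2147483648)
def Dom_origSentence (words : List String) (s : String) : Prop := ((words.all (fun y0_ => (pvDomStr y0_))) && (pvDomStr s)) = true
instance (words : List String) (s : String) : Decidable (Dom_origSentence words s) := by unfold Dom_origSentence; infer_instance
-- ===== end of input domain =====

-- B removes A's first-letter grouping dictionary and is one flat position×word filter (simpler decomposition, same result).

-- ===== PORT A =====
-- the body of A's first loop (builds the first-letter dictionary)
def pvStepA (d : PySem.Dict Char (List String)) (word : String) : PySem.Dict Char (List String) :=
  match PySem.Str.pyGet? word 0 with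
  | none => d   -- Python raises IndexError here (empty word); such inputs are excluded by Pre_
  | some c =>
    if d.contains c = false then d.insert c [word]
    else d.insert c (d.getD c [] ++ [word])

def origSentence (words : List String) (s : String) : List String :=
  let dictionary : PySem.Dict Char (List String) := words.foldl pvStepA PySem.Dict.empty
  (PySem.List.enumerate s.toList).foldl (fun answer p =>
    if dictionary.contains p.2 then
      (dictionary.getD p.2 []).foldl (fun ans word =>
        if PySem.Str.slice s (some p.1) (some (p.1 + PySem.Str.len word)) == word
        then ans ++ [word] else ans) answer
    else answer) []

-- ===== PORT B =====
def origSentence_alt (words : List String) (s : String) : List String :=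
  (PySem.List.pyRange 0 (PySem.Str.len s)).flatMap (fun i =>
    words.filter (fun w =>
      -- hand port of s.startswith(w, i): exact for the 0 ≤ i < len(s) produced by range(len(s))
      PySem.Chars.startswith (s.toList.drop i.toNat) w.toList))

-- ===== PRECONDITION & SPEC =====
-- Pre_ excludes inputs containing an empty word, on which A raises IndexError at word[0].
def Pre_origSentence (words : List String) (s : String) : Prop := ∀ w ∈ words, w ≠ ""
instance (words : List String) (s : String) : Decidable (Pre_origSentence words s) := by unfold Pre_origSentence; infer_instance
def pvWitness_origSentence : List String × String := (["an", "apple"], "an apple")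

def Spec_origSentence (words : List String) (s : String) (out : List String) : Prop := out = origSentence_alt words s
instance (words : List String) (s : String) (out : List String) : Decidable (Spec_origSentence words s out) := by unfold Spec_origSentence; infer_instance

-- ===== CLAIM (what is proved, stated in full; the proofs are below) =====
def Claim_equal_origSentence : Prop := ∀ (words : List String) (s : String), Dom_origSentence words s → Pre_origSentence words s → Spec_origSentence words s (origSentence words s)

-- ===== LEMMAS AND PROOFS =====

-- the match test both loops perform at position i for word w
def pvMatch (s : String) (i : Int) (w : String) : Bool :=
  PySem.Str.slice s (some i) (some (i + PySem.Str.len w)) == w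

-- A's dictionary maps each character c to the words whose first character is c, in original order.
theorem pv_build_getD (ws : List String) (c : Char) (d : PySem.Dict Char (List String)) :
    (ws.foldl pvStepA d).getD c []
      = d.getD c [] ++ ws.filter (fun w => PySem.Str.pyGet? w 0 == some c) := by
  induction ws generalizing d with
  | nil => simp
  | cons w ws ih =>
    simp only [List.foldl_cons, List.filter_cons]
    cases hw : PySem.Str.pyGet? w 0 with
    | none =>
      have hstep : pvStepA d w = d := by unfold pvStepA; rw [hw]
      rw [hstep, ih]
      simp
    | some c' =>
      have hstep : pvStepA d w
          = if d.contains c' = false then d.insert c' [w]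
            else d.insert c' (d.getD c' [] ++ [w]) := by unfold pvStepA; rw [hw]
      have hins : (pvStepA d w).getD c []
          = if c = c' then d.getD c' [] ++ [w] else d.getD c [] := by
        rw [hstep]
        by_cases h : d.contains c' = false
        · rw [if_pos h, PySem.Dict.getD_insert]
          split_ifs with hcc
          · rw [PySem.Dict.getD_of_not_contains d [] h]
            simp
          · rfl
        · rw [if_neg h, PySem.Dict.getD_insert]
      rw [ih, hins]
      by_cases hcc : c' = c
      · subst hcc
        simp [List.append_assoc]
      · have h2 : ¬ c = c' := fun h => hcc h.symm
        rw [if_neg h2]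
        simp [hcc]

-- if w (nonempty) matches at a valid position i, its first character is s[i]
theorem pv_match_head (s w : String) (i : Int) (h0 : 0 ≤ i) (h1 : i < (s.toList.length : Int))
    (hw : w ≠ "") (hm : pvMatch s i w = true) :
    (PySem.Str.pyGet? w 0 == some (PySem.List.pyGetD s.toList i 'a')) = true := by
  unfold pvMatch at hm
  have hsl : PySem.Str.slice s (some i) (some (i + PySem.Str.len w)) = w := beq_iff_eq.mp hm
  have htl : PySem.List.slice s.toList (some i) (some (i + PySem.Str.len w)) = w.toList := by
    rw [← PySem.Chars.slice_eq_listSlice, ← PySem.Str.toList_slice, hsl]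
  have hlen : PySem.Str.len w = (w.toList.length : Int) := PySem.Str.len_eq w
  have hnil : w.toList ≠ [] := by
    intro hl
    exact hw (String.toList_inj.mp (by simp [hl]))
  rw [PySem.List.slice_toNat _ h0 (by omega), hlen] at htl
  have hk : ((i + (w.toList.length : Int)).toNat - i.toNat) = w.toList.length := by omega
  rw [hk] at htl
  obtain ⟨c0, rest, hw0⟩ := List.exists_cons_of_ne_nil hnil
  have hhead : (s.toList.drop i.toNat).head? = some c0 := by
    have h2 := congrArg List.head? htl
    rw [List.head?_take, hw0] at h2
    simp only [List.length_cons] at h2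
    rw [if_neg (by omega)] at h2
    simpa using h2
  have hget : s.toList[i.toNat]? = some c0 := by
    rw [← List.head?_drop]; exact hhead
  have hgd : PySem.List.pyGetD s.toList i 'a' = c0 := by
    rw [PySem.List.pyGetD_eq_getElem s.toList 'a' h0 h1]
    rw [List.getElem?_eq_getElem (show i.toNat < s.toList.length by omega)] at hget
    exact Option.some_inj.mp hget
  have hg0 : PySem.Str.pyGet? w 0 = some c0 := by
    have h3 := PySem.Str.pyGet?_natCast w 0
    simpa [hw0] using h3
  rw [hg0, hgd]
  simp

theorem pv_flatMap_congr {α β : Type} {l : List α} {f g : α → List β}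
    (h : ∀ a ∈ l, f a = g a) : l.flatMap f = l.flatMap g := by
  simp only [List.flatMap_def]
  rw [List.map_congr_left h]

-- at each valid position, filtering A's bucket equals filtering the whole word list
-- for 0 ≤ i, A's slice test s[i:i+len(w)] == w is s.startswith(w, i)
theorem pv_match_eq_starts (s : String) (i : Int) (w : String) (h0 : 0 ≤ i) :
    pvMatch s i w = PySem.Chars.startswith (s.toList.drop i.toNat) w.toList := by
  rw [Bool.eq_iff_iff]
  unfold pvMatch
  rw [beq_iff_eq, PySem.Chars.startswith_iff, ← String.toList_inj,
    PySem.Str.toList_slice, PySem.Chars.slice_eq_listSlice, PySem.Str.len_eq,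
    PySem.List.slice_toNat _ h0 (by omega)]
  have hk : ((i + (w.toList.length : Int)).toNat - i.toNat) = w.toList.length := by omega
  rw [hk, List.prefix_iff_eq_take]
  exact eq_comm

theorem pv_bucket_filter (words : List String) (s : String) (i : Int)
    (h0 : 0 ≤ i) (h1 : i < (s.toList.length : Int)) (hpre : ∀ w ∈ words, w ≠ "") :
    ((words.foldl pvStepA PySem.Dict.empty).getD (PySem.List.pyGetD s.toList i 'a') []).filter (pvMatch s i)
      = words.filter (pvMatch s i) := by
  rw [pv_build_getD, PySem.Dict.getD_empty]
  simp only [List.nil_append]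
  rw [List.filter_filter]
  refine List.filter_congr ?_
  intro w hwmem
  cases hm : pvMatch s i w
  · simp
  · simp only [Bool.true_and]
    exact pv_match_head s w i h0 h1 (hpre w hwmem) hm

-- ===== VERDICT =====
theorem pv_outer_step (dict : PySem.Dict Char (List String)) (s : String) :
    (fun (answer : List String) (p : Int × Char) =>
      if dict.contains p.2 then
        (dict.getD p.2 []).foldl (fun ans word =>
          if PySem.Str.slice s (some p.1) (some (p.1 + PySem.Str.len word)) == word
          then ans ++ [word] else ans) answer
      else answer)
      = fun answer p => answer ++ (dict.getD p.2 []).filter (pvMatch s p.1) := by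
  funext answer p
  by_cases h : dict.contains p.2
  · rw [if_pos h]
    exact PySem.List.foldl_append_if_eq_filter (pvMatch s p.1) _ answer
  · rw [if_neg h, PySem.Dict.getD_of_not_contains dict [] (by simpa using h)]
    simp

theorem origSentence_spec : Claim_equal_origSentence := by
  intro words s _ hpre
  unfold Spec_origSentence
  simp only [origSentence, origSentence_alt]
  rw [pv_outer_step (words.foldl pvStepA PySem.Dict.empty) s,
    PySem.List.foldl_append_eq_flatMap, List.nil_append,
    PySem.List.enumerate_eq_map_pyRange s.toList 'a', List.flatMap_map]
  have hlen : PySem.List.len s.toList = PySem.Str.len s := by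
    rw [PySem.List.len_eq, PySem.Str.len_eq]
  rw [hlen]
  refine pv_flatMap_congr ?_
  intro i hi
  obtain ⟨hi0, hi1⟩ := PySem.List.mem_pyRange_one.mp hi
  have hi1' : i < (s.toList.length : Int) := by
    have h4 : PySem.Str.len s = (s.toList.length : Int) := PySem.Str.len_eq s
    omega
  rw [pv_bucket_filter words s i hi0 hi1' hpre]
  exact List.filter_congr (fun w _ => pv_match_eq_starts s i w hi0)
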